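-- pv_equiv track=rewrite | github.com/amoskwok1101/DNA-Hashing | batchify.py | convert_sequences_to_kmers
-- ===== SOURCE A (Python) =====
-- def convert_sequences_to_kmers(sequences, k):
--     kmer_sequences=[]
--     for sequence in sequences:
--         sequence = ''.join(sequence)
--         kmers = []
--         for i in range(len(sequence) - k + 1):
--             kmer = sequence[i:i+k]
--             kmers.append(kmer)
--         kmer_sequences.append(kmers)
--     return kmer_sequences
-- ===== SOURCE B (Python) =====
-- def convert_sequences_to_kmers(sequences, k):
--     # k-mers read column-wise by transposing k shifted views of the joined sequence
--     return [list(map(''.join, zip(*[s[i:] for i in range(k)]))) if k <= len(s) else []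
--             for s in (''.join(seq) for seq in sequences)]
-- ===== Notes on version B (the rewrite author's own statement) =====
-- stated objective: idiomatic
-- what changed: B builds each sequence's k-mers by transposing k shifted suffix views with zip (column-wise reading) instead of A's loop slicing one substring per start index, and returns a nested comprehension instead of accumulator lists. Pre_ excludes k <= 0, a degenerate corner outside the function's purpose, where A returns len-k+1 empty/degenerate slices and B returns no k-mers: both values are defensible and neither is specified.
-- outside the precondition, e.g. on convert_sequences_to_kmers([['ab']], 0): A returns [['', '', '']], B returns [[]]; on convert_sequences_to_kmers([['ab']], -1): A returns [['a', '', '', '']], B returns [[]]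
import Mathlib
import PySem

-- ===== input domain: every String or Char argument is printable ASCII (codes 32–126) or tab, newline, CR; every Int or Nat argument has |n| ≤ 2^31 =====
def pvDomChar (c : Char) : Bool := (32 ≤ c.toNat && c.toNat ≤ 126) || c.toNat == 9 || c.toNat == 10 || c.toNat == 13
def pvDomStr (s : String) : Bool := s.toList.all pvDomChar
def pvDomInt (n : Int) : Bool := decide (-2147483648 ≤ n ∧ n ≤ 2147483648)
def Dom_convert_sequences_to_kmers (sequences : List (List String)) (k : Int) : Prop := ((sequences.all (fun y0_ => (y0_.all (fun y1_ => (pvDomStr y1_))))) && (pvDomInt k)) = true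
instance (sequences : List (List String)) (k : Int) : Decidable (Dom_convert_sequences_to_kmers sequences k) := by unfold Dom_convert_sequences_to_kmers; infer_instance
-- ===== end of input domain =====

-- B reads each sequence's k-mers column-wise by transposing k shifted suffix views (zip-transpose)
-- instead of A's per-start-index slicing; same cost, different decomposition.
-- Pre_ excludes k ≤ 0: a degenerate corner outside the function's purpose, where A returns len-k+1
-- empty/degenerate slices and B returns no k-mers — both values defensible, neither specified.


-- ===== PORT A =====
def convert_sequences_to_kmers (sequences : List (List String)) (k : Int) : List (List String) :=
  sequences.foldl (fun kmer_sequences sequence =>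
    let s := PySem.Str.join "" sequence
    let kmers := (PySem.List.pyRange 0 ((PySem.Str.len s : Int) - k + 1) 1).foldl
      (fun kmers i => kmers ++ [PySem.Str.slice s (some i) (some (i + k))]) ([] : List String)
    kmer_sequences ++ [kmers]) []

-- ===== PORT B =====
-- pvZipT = Python's zip(*ls) on lists of characters: columns until the shortest list is exhausted
def pvZipT (ls : List (List Char)) : List (List Char) :=
  if h : ls.isEmpty || ls.any (fun l => l.isEmpty) then []
  else (ls.map (fun l => l.headD ' ')) :: pvZipT (ls.map (fun l => l.tail))
termination_by (ls.headD []).length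
decreasing_by
  simp only [Bool.or_eq_true, List.isEmpty_iff, List.any_eq_true, not_or, not_exists] at h
  obtain ⟨h1, h2⟩ := h
  match ls, h1, h2 with
  | a :: rest, _, h2 =>
    have ha : a.length ≠ 0 := by
      simp only [ne_eq, List.length_eq_zero_iff]
      intro hc; exact (h2 a) ⟨List.mem_cons_self, by simp [hc]⟩
    simp [List.length_tail]
    omega

-- ''.join over zip's character tuples is String.ofList on each column — exact
def convert_sequences_to_kmers_alt (sequences : List (List String)) (k : Int) : List (List String) :=
  sequences.map (fun seq =>
    let s := PySem.Str.join "" seq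
    if k ≤ (PySem.Str.len s : Int) then
      (pvZipT ((PySem.List.pyRange 0 k 1).map
        (fun i => (PySem.Str.slice s (some i) none).toList))).map String.ofList
    else [])

-- ===== PRECONDITION & SPEC =====
-- Pre_ excludes k ≤ 0: a degenerate corner outside the function's purpose, where A returns len-k+1
-- empty/degenerate slices and B returns no k-mers — both values defensible, neither specified.
def Pre_convert_sequences_to_kmers (sequences : List (List String)) (k : Int) : Prop := 1 ≤ k
instance (sequences : List (List String)) (k : Int) : Decidable (Pre_convert_sequences_to_kmers sequences k) := by unfold Pre_convert_sequences_to_kmers; infer_instance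
def pvWitness_convert_sequences_to_kmers : List (List String) × Int := ([["AC", "GT"], ["TGA"]], 2)

def Spec_convert_sequences_to_kmers (sequences : List (List String)) (k : Int) (out : List (List String)) : Prop := out = convert_sequences_to_kmers_alt sequences k
instance (sequences : List (List String)) (k : Int) (out : List (List String)) : Decidable (Spec_convert_sequences_to_kmers sequences k out) := by unfold Spec_convert_sequences_to_kmers; infer_instance

-- ===== CLAIM (what is proved, stated in full; the proofs are below) =====
def Claim_equal_convert_sequences_to_kmers : Prop := ∀ (sequences : List (List String)) (k : Int), Dom_convert_sequences_to_kmers sequences k → Pre_convert_sequences_to_kmers sequences k → Spec_convert_sequences_to_kmers sequences k (convert_sequences_to_kmers sequences k)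

-- ===== LEMMAS AND PROOFS =====

-- the head of each shifted suffix spells out the prefix: columns of the transpose
theorem pv_col_take (l : List Char) (K : Nat) (hK : K ≤ l.length) :
    (List.range K).map (fun i => (l.drop i).headD ' ') = l.take K := by
  apply List.ext_getElem (by simp; omega)
  intro i h1 h2
  simp only [List.getElem_map, List.getElem_range, List.getElem_take]
  have hi : i < l.length := by simp at h1; omega
  rw [List.drop_eq_getElem_cons hi]; rfl

-- transposing the K shifted suffixes of cs yields exactly the windows of length K
theorem pv_zipT_views (cs : List Char) (K : Nat) (hK : 1 ≤ K) :
    pvZipT ((List.range K).map (fun i => cs.drop i)) =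
      (List.range (cs.length + 1 - K)).map (fun j => (cs.drop j).take K) := by
  induction cs with
  | nil =>
    rw [pvZipT]
    have h1 : (1 : Nat) - K = 0 := by omega
    simp [h1]
  | cons c cs ih =>
    rw [pvZipT]
    by_cases hlen : (c :: cs).length < K
    · have hlen' : cs.length + 1 < K := by simpa using hlen
      have h0 : cs.length + 1 + 1 - K = 0 := by omega
      simp only [List.length_cons, h0, List.range_zero, List.map_nil]
      rw [dif_pos (Bool.or_eq_true _ _ |>.mpr (Or.inr (by
        simp only [List.any_eq_true, List.mem_map, List.mem_range]
        exact ⟨[], ⟨cs.length + 1, by omega, by simp⟩, rfl⟩)))]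
    · rw [not_lt] at hlen
      have hcond : ¬ ((((List.range K).map (fun i => (c :: cs).drop i)).isEmpty = true) ∨
          (((List.range K).map (fun i => (c :: cs).drop i)).any (fun l => l.isEmpty)) = true) := by
        simp only [List.isEmpty_iff, List.any_eq_true, not_or]
        constructor
        · simp [List.map_eq_nil_iff, List.range_eq_nil]; omega
        · rintro ⟨l, hl, hle⟩
          simp only [List.mem_map, List.mem_range] at hl
          obtain ⟨i, hiK, rfl⟩ := hl
          simp only [List.drop_eq_nil_iff] at hle
          omega
      rw [dif_neg (by simpa using hcond)]
      simp only [List.map_map, Function.comp_def]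
      have htail : (fun i => ((c :: cs).drop i).tail) = fun i => cs.drop i := by
        funext i; simp [List.tail_drop]
      rw [htail, pv_col_take _ _ hlen, ih]
      have hrange : (c :: cs).length + 1 - K = (cs.length + 1 - K) + 1 := by
        simp only [List.length_cons] at hlen ⊢; omega
      rw [hrange, List.range_succ_eq_map, List.map_cons, List.map_map]
      simp [Function.comp_def, List.drop_succ_cons]

-- per-sequence: A's slicing loop equals B's zip-transpose, for any string and k ≥ 1
theorem pv_kmers_eq (s : String) (k : Int) (hk : 1 ≤ k) :
    (PySem.List.pyRange 0 ((PySem.Str.len s : Int) - k + 1) 1).foldl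
        (fun kmers i => kmers ++ [PySem.Str.slice s (some i) (some (i + k))]) [] =
      (if k ≤ (PySem.Str.len s : Int) then
        (pvZipT ((PySem.List.pyRange 0 k 1).map
          (fun i => (PySem.Str.slice s (some i) none).toList))).map String.ofList
      else []) := by
  obtain ⟨K, rfl⟩ : ∃ K : Nat, k = (K : Int) := ⟨k.toNat, (Int.toNat_of_nonneg (by omega)).symm⟩
  have hK : 1 ≤ K := by exact_mod_cast hk
  by_cases hle : (K : Int) ≤ (PySem.Str.len s : Int)
  case neg =>
    rw [if_neg hle, PySem.List.foldl_append_singleton_eq_map, List.nil_append]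
    have h0 : (((PySem.Str.len s : Int) - ↑K + 1) - 0).toNat = 0 := by omega
    rw [PySem.List.pyRange_one, h0, List.range_zero, List.map_nil, List.map_nil]
  rw [if_pos hle]
  rw [PySem.List.foldl_append_singleton_eq_map, List.nil_append,
    PySem.List.pyRange_one, PySem.List.pyRange_one, List.map_map, List.map_map]
  have hviews : (List.range (((K : Int) - 0)).toNat).map
      ((fun i => (PySem.Str.slice s (some i) none).toList) ∘ (fun j : Nat => (0 : Int) + ↑j)) =
      (List.range K).map (fun i => s.toList.drop i) := by
    have hKn : ((K : Int) - 0).toNat = K := by omega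
    rw [hKn]
    refine List.map_congr_left (fun i _ => ?_)
    simp [PySem.List.slice_from_natCast]
  rw [hviews, pv_zipT_views _ _ hK]
  have hm : ((((PySem.Str.len s : Int) - ↑K + 1)) - 0).toNat = s.toList.length + 1 - K := by
    simp only [PySem.Str.len_eq]
    omega
  rw [hm, List.map_map]
  refine List.map_congr_left (fun j _ => ?_)
  apply String.toList_inj.mp
  simp only [Function.comp_apply, zero_add, String.toList_ofList]
  simp only [PySem.Str.toList_slice, PySem.Chars.slice_eq_listSlice,
    (by push_cast; ring : (j : Int) + (K : Int) = ((j + K : Nat) : Int))]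
  rw [PySem.List.slice_natCast]
  have hjk : j + K - j = K := by omega
  rw [hjk]

-- ===== VERDICT (by name: the statement is the Claim_ definition above) =====
theorem convert_sequences_to_kmers_spec : Claim_equal_convert_sequences_to_kmers := by
  intro sequences k _ hpre
  unfold Spec_convert_sequences_to_kmers convert_sequences_to_kmers convert_sequences_to_kmers_alt
  rw [PySem.List.foldl_append_singleton_eq_map]
  simp only [List.nil_append]
  exact List.map_congr_left (fun seq _ => pv_kmers_eq _ k hpre)
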